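-- pv_equiv track=rewrite | github.com/nathanmedz/adventofcode | 2023/12/solve.py | solution_is_possible
-- ===== SOURCE A (Python) =====
-- def solution_is_possible(spring_line, groups):
--     curr_counts = []
--     consec = 0
--     for i, char in enumerate(spring_line):
--         if char == '#':
--             consec += 1
--         elif char == '.':
--             if consec > 0:
--                 curr_counts.append(consec)
--                 consec = 0
--         elif char == '?':
--             break
--
--     for c, g in zip(curr_counts, groups):
--         if c != g:
--             return False
--
--     return True
-- ===== SOURCE B (Python) =====
-- def solution_is_possible(spring_line, groups):
--     prefix = spring_line.partition('?')[0]
--     closed = prefix.split('.')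
--     closed.pop()  # the final segment is not terminated by '.', so it is not a recorded run
--     curr_counts = [sum(ch == '#' for ch in seg) for seg in closed if '#' in seg]
--     return all(c == g for c, g in zip(curr_counts, groups))
-- ===== Notes on version B (the rewrite author's own statement) =====
-- stated objective: faster
-- what changed: B replaces A's char-by-char state machine (consec counter + append loop + early-return compare loop) with a string-decomposition pipeline: cut at the first '?' with partition, split on '.', drop the unterminated last segment, count '#' per segment, and compare with all(...) over zip.
import Mathlib
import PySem

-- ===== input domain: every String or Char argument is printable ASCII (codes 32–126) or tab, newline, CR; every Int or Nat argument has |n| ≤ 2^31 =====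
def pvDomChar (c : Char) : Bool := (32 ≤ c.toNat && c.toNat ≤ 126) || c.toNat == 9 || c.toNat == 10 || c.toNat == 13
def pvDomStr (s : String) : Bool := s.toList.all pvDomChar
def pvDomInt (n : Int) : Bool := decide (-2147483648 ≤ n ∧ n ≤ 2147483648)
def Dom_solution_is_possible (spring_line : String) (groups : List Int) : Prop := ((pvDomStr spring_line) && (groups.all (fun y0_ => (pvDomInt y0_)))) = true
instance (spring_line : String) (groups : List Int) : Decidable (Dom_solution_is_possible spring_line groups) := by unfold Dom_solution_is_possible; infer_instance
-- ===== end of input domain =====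

-- B is an idiomatic string-decomposition pipeline (cut at '?', split on '.', count '#' per closed
-- segment, compare with all/zip) instead of A's char-by-char state machine; return value only.

-- ===== PORT A =====
-- the for-loop over the characters: state = (curr_counts accumulator, consec); '?' breaks
def pvALoop (cs : List Char) (acc : List Int) (consec : Int) : List Int :=
  match cs with
  | [] => acc
  | c :: rest =>
    if c = '#' then pvALoop rest acc (consec + 1)
    else if c = '.' then
      if consec > 0 then pvALoop rest (acc ++ [consec]) 0
      else pvALoop rest acc consec
    else if c = '?' then acc
    else pvALoop rest acc consec

-- the second loop: zip compare, early return False on mismatch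
def pvACheck (cs : List Int) (gs : List Int) : Bool :=
  match cs, gs with
  | c :: cs', g :: gs' => if c ≠ g then false else pvACheck cs' gs'
  | _, _ => true

def solution_is_possible (spring_line : String) (groups : List Int) : Bool :=
  pvACheck (pvALoop spring_line.toList [] 0) groups

-- ===== PORT B =====
def solution_is_possible_alt (spring_line : String) (groups : List Int) : Bool :=
  -- prefix = spring_line.partition('?')[0]  (hand port: everything before the first '?'; exact)
  let pre := spring_line.toList.takeWhile (fun c => c != '?')
  -- closed = prefix.split('.'); closed.pop()
  let closed := (List.splitOn '.' pre).dropLast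
  -- [sum(ch == '#' for ch in seg) for seg in closed if '#' in seg]
  let curr_counts := (closed.filter (fun seg => PySem.Chars.isIn ['#'] seg)).map
      (fun seg => (seg.map (fun ch => if ch == '#' then (1 : Int) else 0)).sum)
  -- all(c == g for c, g in zip(curr_counts, groups))
  (curr_counts.zip groups).all (fun p => p.1 == p.2)

-- ===== PRECONDITION & SPEC =====
def Spec_solution_is_possible (spring_line : String) (groups : List Int) (out : Bool) : Prop := out = solution_is_possible_alt spring_line groups
instance (spring_line : String) (groups : List Int) (out : Bool) : Decidable (Spec_solution_is_possible spring_line groups out) := by unfold Spec_solution_is_possible; infer_instance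

-- ===== CLAIM (what is proved, stated in full; the proofs are below) =====
def Claim_equal_solution_is_possible : Prop := ∀ (spring_line : String) (groups : List Int), Dom_solution_is_possible spring_line groups → Spec_solution_is_possible spring_line groups (solution_is_possible spring_line groups)

-- ===== LEMMAS AND PROOFS =====

-- A's loop without the accumulator
def pvRuns (cs : List Char) (consec : Int) : List Int :=
  match cs with
  | [] => []
  | c :: rest =>
    if c = '#' then pvRuns rest (consec + 1)
    else if c = '.' then
      if consec > 0 then consec :: pvRuns rest 0
      else pvRuns rest consec
    else if c = '?' then [] else pvRuns rest consec

lemma pvALoop_eq_append (cs : List Char) (acc : List Int) (consec : Int) :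
    pvALoop cs acc consec = acc ++ pvRuns cs consec := by
  induction cs generalizing acc consec with
  | nil => simp [pvALoop, pvRuns]
  | cons c rest ih =>
    simp only [pvALoop, pvRuns]
    split_ifs <;> simp [ih]

-- counts of the dot-closed segments, with `n` pending '#'s carried into the first segment
def pvSegCounts (segs : List (List Char)) (n : Nat) : List Int :=
  match segs with
  | [] => []
  | [_] => []
  | seg :: rest =>
    let k := n + seg.countP (fun ch => ch == '#')
    (if 0 < k then [(k : Int)] else []) ++ pvSegCounts rest 0

lemma pvSegCounts_cons_cons (seg h : List Char) (t : List (List Char)) (n : Nat) :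
    pvSegCounts (seg :: h :: t) n =
      (if 0 < n + seg.countP (fun ch => ch == '#') then
        [((n + seg.countP (fun ch => ch == '#') : Nat) : Int)] else []) ++
      pvSegCounts (h :: t) 0 := rfl

lemma pvSegCounts_consChar (c : Char) (h : List Char) (t : List (List Char)) (n : Nat) :
    pvSegCounts ((c :: h) :: t) n =
      pvSegCounts (h :: t) (n + if c == '#' then 1 else 0) := by
  cases t with
  | nil => rfl
  | cons t0 ts =>
    cases hc : c == '#'
    · have e : List.countP (fun ch => ch == '#') (c :: h) =
          List.countP (fun ch => ch == '#') h := by simp [List.countP_cons, hc]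
    
      rw [pvSegCounts_cons_cons, pvSegCounts_cons_cons, e]
      simp
    · have e : List.countP (fun ch => ch == '#') (c :: h) =
          List.countP (fun ch => ch == '#') h + 1 := by simp [List.countP_cons, hc]
      rw [pvSegCounts_cons_cons, pvSegCounts_cons_cons, e]
      have e2 : n + (List.countP (fun ch => ch == '#') h + 1) =
          n + 1 + List.countP (fun ch => ch == '#') h := by omega
      rw [e2]
      simp

lemma pvRuns_eq_segCounts (cs : List Char) (n : Nat) :
    pvRuns cs (n : Int) =
      pvSegCounts ((cs.takeWhile (fun c => c != '?')).splitOnP (· == '.')) n := by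
  induction cs generalizing n with
  | nil => simp [pvRuns, List.splitOnP_nil, pvSegCounts]
  | cons c rest ih =>
    by_cases hq : c = '?'
    · subst hq
      simp [pvRuns, List.takeWhile_cons, List.splitOnP_nil, pvSegCounts]
    · have htw : (c :: rest).takeWhile (fun c => c != '?') =
          c :: rest.takeWhile (fun c => c != '?') := by
        simp [List.takeWhile_cons, hq]
      obtain ⟨h, t, ht⟩ := List.exists_cons_of_ne_nil
        (List.splitOnP_ne_nil (· == '.') (rest.takeWhile (fun c => c != '?')))
      rw [htw, List.splitOnP_cons, ht]
      by_cases hd : c = '.'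
      · subst hd
        rw [if_pos (by simp)]
        rw [pvSegCounts_cons_cons, List.countP_nil, Nat.add_zero]
        have ih0 : pvRuns rest ((0 : Nat) : Int) = pvSegCounts (h :: t) 0 := by
          rw [ih 0, ht]
        by_cases hn : 0 < n
        · have hni : (0 : Int) < (n : Int) := by exact_mod_cast hn
          show (if ((0:Int) < (n:Int)) then (n : Int) :: pvRuns rest 0 else pvRuns rest (n : Int)) = _
          rw [if_pos hni, if_pos hn]
          simpa using congrArg (List.cons (n : Int)) ih0
        · have hn0 : n = 0 := by omega
          subst hn0
          show (if ((0:Int) < ((0:Nat):Int)) then ((0:Nat) : Int) :: pvRuns rest 0 else pvRuns rest ((0:Nat) : Int)) = _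
          rw [if_neg (by norm_num), if_neg hn, ih0, List.nil_append]
      · rw [if_neg (by simp [hd]), List.modifyHead_cons, pvSegCounts_consChar]
        by_cases hh : c = '#'
        · subst hh
          have hl : pvRuns ('#' :: rest) ((n : Nat) : Int) = pvRuns rest ((n : Int) + 1) := by
            simp [pvRuns]
          have hcast : ((n : Int)) + 1 = ((n + 1 : Nat) : Int) := by push_cast; ring
          rw [hl, hcast, ih (n + 1), ht]
          simp
        · have hl : pvRuns (c :: rest) ((n : Nat) : Int) = pvRuns rest ((n : Nat) : Int) := by
            simp [pvRuns, hh, hd, hq]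
          rw [hl, ih n, ht]
          simp [hh]

lemma pvIsIn_hash (s : List Char) : PySem.Chars.isIn ['#'] s = true ↔ '#' ∈ s := by
  rw [PySem.Chars.isIn_iff_infix]
  constructor
  · rintro ⟨t, u, hu⟩; rw [← hu]; simp
  · intro hm
    obtain ⟨t, u, hu⟩ := List.append_of_mem hm
    exact ⟨t, u, by simp [hu]⟩

lemma pvSum_eq_countP (s : List Char) :
    (s.map (fun ch => if ch == '#' then (1 : Int) else 0)).sum =
      ((s.countP (fun ch => ch == '#') : Nat) : Int) := by
  induction s with
  | nil => simp
  | cons a as ihs =>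
    simp only [List.map_cons, List.sum_cons, List.countP_cons, ihs]
    by_cases ha : a = '#' <;> simp [ha] <;> push_cast <;> ring

lemma pvSegCounts_zero (segs : List (List Char)) :
    pvSegCounts segs 0 =
      (segs.dropLast.filter (fun seg => PySem.Chars.isIn ['#'] seg)).map
        (fun seg => (seg.map (fun ch => if ch == '#' then (1 : Int) else 0)).sum) := by
  induction segs with
  | nil => simp [pvSegCounts]
  | cons s rest ih =>
    cases rest with
    | nil => simp [pvSegCounts]
    | cons r rs =>
      simp only [pvSegCounts, Nat.zero_add,
        List.dropLast_cons_of_ne_nil (by simp : r :: rs ≠ ([] : List (List Char))),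
        List.filter_cons]
      by_cases hpos : 0 < s.countP (fun ch => ch == '#')
      · have hin : PySem.Chars.isIn ['#'] s = true := by
          rw [pvIsIn_hash s]
          obtain ⟨a, ha, hpa⟩ := List.countP_pos_iff.mp hpos
          have : a = '#' := by simpa using hpa
          exact this ▸ ha
        rw [if_pos hpos]
        simp [hin, ih, ← pvSum_eq_countP]
      · have hin : PySem.Chars.isIn ['#'] s = false := by
          rw [Bool.eq_false_iff]
          intro h
          exact hpos (List.countP_pos_iff.mpr ⟨'#', (pvIsIn_hash s).mp h, by simp⟩)
        rw [if_neg hpos]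
        simp [hin, ih]

lemma pvACheck_eq_all (cs gs : List Int) :
    pvACheck cs gs = (cs.zip gs).all (fun p => p.1 == p.2) := by
  induction cs generalizing gs with
  | nil => simp [pvACheck]
  | cons c cs' ih =>
    cases gs with
    | nil => simp [pvACheck]
    | cons g gs' =>
      simp only [pvACheck, List.zip_cons_cons, List.all_cons, ih]
      by_cases h : c = g <;> simp [h]

-- ===== VERDICT (by name: the statement is the Claim_ definition above) =====
theorem solution_is_possible_spec : Claim_equal_solution_is_possible := by
  intro s groups _
  unfold Spec_solution_is_possible solution_is_possible solution_is_possible_alt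
  rw [pvACheck_eq_all, pvALoop_eq_append, List.nil_append]
  have h0 : (0 : Int) = ((0 : Nat) : Int) := by norm_num
  rw [h0, pvRuns_eq_segCounts, pvSegCounts_zero]
  rfl
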